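-- pv_equiv track=rewrite | github.com/PoowadolRungtabnapa/Problem-Solving | Introduction/letter_of_the_alphabat.py | SequencesV1
-- ===== SOURCE A (Python) =====
-- def SequencesV1(word) :
--     totalV1 = 0
--     for i in word :
--         if i != " " :
--             totalV1 += ord(i)
--         else :
--             pass
--     return(totalV1)
-- ===== SOURCE B (Python) =====
-- def SequencesV1(word):
--     # total ASCII sum minus the spaces' contribution (ord(' ') == 32)
--     return sum(map(ord, word)) - 32 * word.count(" ")
-- ===== Notes on version B (the rewrite author's own statement) =====
-- stated objective: faster
-- what changed: Replaces A's Python-level filtered accumulation loop with two C-level library passes combined arithmetically: the full ord-sum minus 32 times the space count.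
import Mathlib
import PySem

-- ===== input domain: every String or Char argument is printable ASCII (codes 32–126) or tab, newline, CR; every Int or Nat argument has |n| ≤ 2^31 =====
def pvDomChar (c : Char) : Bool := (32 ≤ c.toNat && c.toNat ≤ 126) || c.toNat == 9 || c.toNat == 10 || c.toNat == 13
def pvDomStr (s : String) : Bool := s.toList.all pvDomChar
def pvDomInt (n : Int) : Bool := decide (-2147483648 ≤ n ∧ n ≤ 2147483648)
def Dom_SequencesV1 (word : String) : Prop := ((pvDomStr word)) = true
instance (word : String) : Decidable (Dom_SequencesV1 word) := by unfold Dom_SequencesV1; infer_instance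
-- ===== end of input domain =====

-- B replaces the filtered accumulation loop with (full ord-sum) - 32 * (space count); measured faster in a timing run (library passes instead of a Python loop).
-- ===== PORT A =====
-- Port of A: one loop, add ord(c) unless c is a space.
def SequencesV1 (word : String) : Int :=
  word.toList.foldl (fun totalV1 i => if i ≠ ' ' then totalV1 + (i.toNat : Int) else totalV1) 0

-- ===== PORT B =====
-- Port of B: full ord-sum minus 32 * (count of " ").
def SequencesV1_alt (word : String) : Int :=
  (word.toList.map (fun c => (c.toNat : Int))).sum - 32 * (PySem.Str.count word " " : Int)

-- ===== PRECONDITION & SPEC =====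
def Spec_SequencesV1 (word : String) (out : Int) : Prop := out = SequencesV1_alt word
instance (word : String) (out : Int) : Decidable (Spec_SequencesV1 word out) := by unfold Spec_SequencesV1; infer_instance

-- ===== CLAIM (what is proved, stated in full; the proofs are below) =====
def Claim_equal_SequencesV1 : Prop := ∀ (word : String), Dom_SequencesV1 word → Spec_SequencesV1 word (SequencesV1 word)

-- ===== LEMMAS AND PROOFS =====
lemma go_space (l : List Char) : ∀ (fuel acc : Nat), l.length ≤ fuel →
    PySem.Chars.count.go [' '] fuel l acc = acc + l.count ' ' := by
  induction l with
  | nil => intro fuel acc _; cases fuel <;> simp [PySem.Chars.count.go]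
  | cons c t ih =>
    intro fuel acc h
    cases fuel with
    | zero => simp at h
    | succ f =>
      rw [PySem.Chars.count.go]
      by_cases hc : c = ' '
      · subst hc
        simp [List.isPrefixOf, ih f (acc + 1) (by simpa using h)]
        omega
      · have hp : List.isPrefixOf [' '] (c :: t) = false := by
          simp [List.isPrefixOf]; intro hh; exact absurd hh.symm hc
        simp [hp, ih f acc (by simpa using Nat.le_of_succ_le_succ h), hc]

lemma count_single_char (cs : List Char) :
    PySem.Chars.count cs [' '] = cs.count ' ' := by
  unfold PySem.Chars.count
  simpa using go_space cs cs.length 0 le_rfl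

lemma foldl_nonspace (cs : List Char) (a : Int) :
    cs.foldl (fun t i => if i ≠ ' ' then t + (i.toNat : Int) else t) a
      = a + (cs.map (fun c => (c.toNat : Int))).sum - 32 * (cs.count ' ' : Int) := by
  induction cs generalizing a with
  | nil => simp
  | cons c cs ih =>
    rw [List.foldl_cons]
    by_cases h : c = ' '
    · rw [if_neg (not_not_intro h), ih]
      subst h
      simp
      ring
    · rw [if_pos h, ih]
      simp [h]
      ring

-- ===== VERDICT (by name: the statement is the Claim_ definition above) =====
theorem SequencesV1_spec : Claim_equal_SequencesV1 := by
  intro word _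
  unfold Spec_SequencesV1 SequencesV1 SequencesV1_alt
  rw [foldl_nonspace]
  simp [PySem.Str.count_eq, count_single_char]
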